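-- pv_equiv track=rewrite | github.com/MADAO81/Codewars_tasks | 7 kyu/Thinking & Testing Retention and discard 7 kyu.py | mystery
-- ===== SOURCE A (Python) =====
-- def mystery(n):
--     result = []
--     i = 1
--     while i <= n:
--         if n % i == 0:
--             result.append(i)
--         i +=2
--     return result
-- ===== SOURCE B (Python) =====
-- def mystery(n):
--     # scan divisors only up to sqrt(n); keep odd divisor d and odd cofactor n//d
--     small = []
--     large = []
--     d = 1
--     while d * d <= n:
--         if n % d == 0:
--             q = n // d
--             if d % 2 == 1:
--                 small.append(d)
--             if q % 2 == 1 and q != d: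
--                 large.append(q)
--         d += 1
--     return small + large[::-1]
-- ===== Notes on version B (the rewrite author's own statement) =====
-- stated objective: faster
-- what changed: B scans divisors only up to sqrt(n), collecting odd small divisors in ascending order and odd cofactors in descending order, and concatenates small + reversed(large), instead of A's linear scan over all odd i up to n.
import Mathlib
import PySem

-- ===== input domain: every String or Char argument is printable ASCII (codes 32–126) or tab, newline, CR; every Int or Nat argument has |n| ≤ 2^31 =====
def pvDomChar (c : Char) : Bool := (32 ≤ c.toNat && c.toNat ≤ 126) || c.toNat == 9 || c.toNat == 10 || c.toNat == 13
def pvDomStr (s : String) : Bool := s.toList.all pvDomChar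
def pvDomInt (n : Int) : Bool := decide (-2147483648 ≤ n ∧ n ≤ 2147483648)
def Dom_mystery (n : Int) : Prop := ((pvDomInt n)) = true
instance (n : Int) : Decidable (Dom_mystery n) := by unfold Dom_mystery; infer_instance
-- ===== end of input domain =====

-- B scans divisors only up to sqrt(n) (collecting odd small divisors ascending and odd cofactors
-- descending) instead of A's linear scan over every odd i up to n; same return value, faster.

-- ===== PORT A =====
-- while i <= n: if n % i == 0: result.append(i); i += 2
def mysteryGo (n i : Int) (result : List Int) : List Int :=
  if _h : i ≤ n then
    mysteryGo n (i + 2) (if PySem.Int.mod n i = 0 then result ++ [i] else result)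
  else result
termination_by (n + 1 - i).toNat
decreasing_by omega

def mystery (n : Int) : List Int := mysteryGo n 1 []

-- ===== PORT B =====
-- used by the termination proof of mysteryAltGo (the loop variable d is bounded by n while d*d ≤ n)
theorem pv_le_of_sq_le (d n : Int) (h : d * d ≤ n) : d ≤ n := by nlinarith [mul_self_nonneg d, mul_self_nonneg (d - 1)]

-- while d*d <= n: if n % d == 0: q = n // d; odd d → small.append(d); odd q ≠ d → large.append(q); d += 1
-- return small + large[::-1]
def mysteryAltGo (n d : Int) (small large : List Int) : List Int :=
  if _h : d * d ≤ n then
    if PySem.Int.mod n d = 0 then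
      mysteryAltGo n (d + 1)
        (if PySem.Int.mod d 2 = 1 then small ++ [d] else small)
        (if PySem.Int.mod (PySem.Int.floordiv n d) 2 = 1 ∧ PySem.Int.floordiv n d ≠ d then
          large ++ [PySem.Int.floordiv n d] else large)
    else mysteryAltGo n (d + 1) small large
  else small ++ large.reverse
termination_by (n + 1 - d).toNat
decreasing_by all_goals · have := pv_le_of_sq_le d n (by assumption); omega

def mystery_alt (n : Int) : List Int := mysteryAltGo n 1 [] []

-- ===== PRECONDITION & SPEC =====
def Spec_mystery (n : Int) (out : List Int) : Prop := out = mystery_alt n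
instance (n : Int) (out : List Int) : Decidable (Spec_mystery n out) := by unfold Spec_mystery; infer_instance

-- ===== CLAIM (what is proved, stated in full; the proofs are below) =====
def Claim_equal_mystery : Prop := ∀ (n : Int), Dom_mystery n → Spec_mystery n (mystery n)

-- ===== LEMMAS AND PROOFS =====

-- proof-side pure form of A's loop
def agoA (n i : Int) : List Int :=
  if _h : i ≤ n then
    (if PySem.Int.mod n i = 0 then [i] else []) ++ agoA n (i + 2)
  else []
termination_by (n + 1 - i).toNat
decreasing_by omega

theorem goA_spec (n : Int) : ∀ i result, mysteryGo n i result = result ++ agoA n i := by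
  intro i
  generalize hk : (n + 1 - i).toNat = k
  induction k using Nat.strong_induction_on generalizing i with
  | _ k IH =>
    intro result
    rw [mysteryGo, agoA]
    by_cases h : i ≤ n
    · simp only [dif_pos h]
      rw [IH (n + 1 - (i + 2)).toNat (by omega) (i + 2) rfl]
      split <;> simp
    · simp [dif_neg h]

-- proof-side canonical forms of B's two accumulators
def sd (n d : Int) : List Int :=
  if _h : d * d ≤ n then
    (if n % d = 0 ∧ d % 2 = 1 then [d] else []) ++ sd n (d + 1)
  else []
termination_by (n + 1 - d).toNat
decreasing_by have := pv_le_of_sq_le d n (by assumption); omega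

def ld (n d : Int) : List Int :=
  if _h : d * d ≤ n then
    (if n % d = 0 ∧ (n / d) % 2 = 1 ∧ n / d ≠ d then [n / d] else []) ++ ld n (d + 1)
  else []
termination_by (n + 1 - d).toNat
decreasing_by have := pv_le_of_sq_le d n (by assumption); omega

theorem altGo_spec (n : Int) : ∀ (d : Int), 1 ≤ d → ∀ (small large : List Int),
    mysteryAltGo n d small large = (small ++ sd n d) ++ (large ++ ld n d).reverse := by
  intro d hd
  generalize hk : (n + 1 - d).toNat = k
  induction k using Nat.strong_induction_on generalizing d with
  | _ k IH =>
    intro small large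
    rw [mysteryAltGo, sd, ld]
    by_cases hg : d * d ≤ n
    · simp only [dif_pos hg]
      have hdn : d ≤ n := pv_le_of_sq_le d n hg
      have hmod : PySem.Int.mod n d = n % d := PySem.Int.mod_eq_emod_of_pos (by omega)
      have hdiv : PySem.Int.floordiv n d = n / d := PySem.Int.floordiv_eq_ediv_of_pos (by omega)
      have hmod2 : ∀ a : Int, PySem.Int.mod a 2 = a % 2 := fun a => PySem.Int.mod_eq_emod_of_pos (by omega)
      simp only [hmod, hdiv, hmod2]
      have hIH := IH (n + 1 - (d + 1)).toNat (by omega) (d + 1) (by omega) rfl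
      by_cases h0 : n % d = 0
      · simp only [hIH, h0, true_and]
        by_cases ho : d % 2 = 1 <;> by_cases hq : (n / d) % 2 = 1 ∧ n / d ≠ d <;>
          simp [ho, hq, List.append_assoc, List.reverse_append]
      · simp only [hIH, h0, false_and, if_false, List.nil_append]
    · simp [dif_neg hg]

theorem A_lb (n : Int) : ∀ i, ∀ x ∈ agoA n i, i ≤ x := by
  intro i
  generalize hk : (n + 1 - i).toNat = k
  induction k using Nat.strong_induction_on generalizing i with
  | _ k IH =>
    intro x hx
    rw [agoA] at hx
    by_cases h : i ≤ n
    · simp only [dif_pos h, List.mem_append] at hx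
      rcases hx with hx | hx
      · have : x = i := by split at hx <;> simp_all
        omega
      · have := IH (n + 1 - (i + 2)).toNat (by omega) (i + 2) rfl x hx
        omega
    · simp [dif_neg h] at hx

theorem A_mem (n : Int) : ∀ i, 1 ≤ i → i % 2 = 1 →
    ∀ x, x ∈ agoA n i ↔ (i ≤ x ∧ x ≤ n ∧ x % 2 = 1 ∧ n % x = 0) := by
  intro i hi hio
  generalize hk : (n + 1 - i).toNat = k
  induction k using Nat.strong_induction_on generalizing i with
  | _ k IH =>
    intro x
    rw [agoA]
    by_cases h : i ≤ n
    · have hmod : PySem.Int.mod n i = n % i := PySem.Int.mod_eq_emod_of_pos (by omega)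
      simp only [dif_pos h, hmod, List.mem_append]
      have hIH := IH (n + 1 - (i + 2)).toNat (by omega) (i + 2) (by omega) (by omega) rfl x
      constructor
      · rintro (hx | hx)
        · have hx' : n % i = 0 ∧ x = i := by split at hx <;> simp_all
          obtain ⟨h0, rfl⟩ := hx'
          exact ⟨le_refl _, h, hio, h0⟩
        · obtain ⟨h1, h2, h3, h4⟩ := hIH.mp hx
          exact ⟨by omega, h2, h3, h4⟩
      · rintro ⟨h1, h2, h3, h4⟩
        by_cases hxi : x = i
        · subst hxi
          left
          simp [h4]
        · right
          exact hIH.mpr ⟨by omega, h2, h3, h4⟩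
    · simp only [dif_neg h, List.not_mem_nil, false_iff]
      rintro ⟨h1, h2, _, _⟩
      omega

theorem A_pairwise (n : Int) : ∀ i, List.Pairwise (· < ·) (agoA n i) := by
  intro i
  generalize hk : (n + 1 - i).toNat = k
  induction k using Nat.strong_induction_on generalizing i with
  | _ k IH =>
    rw [agoA]
    by_cases h : i ≤ n
    · simp only [dif_pos h]
      have hIH := IH (n + 1 - (i + 2)).toNat (by omega) (i + 2) rfl
      split
      · refine List.pairwise_cons.mpr ⟨fun x hx => ?_, hIH⟩
        have := A_lb n (i + 2) x hx
        omega
      · simpa using hIH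
    · simp [dif_neg h]

theorem sd_mem (n : Int) : ∀ d, 1 ≤ d →
    ∀ x, x ∈ sd n d ↔ (d ≤ x ∧ x * x ≤ n ∧ n % x = 0 ∧ x % 2 = 1) := by
  intro d hd
  generalize hk : (n + 1 - d).toNat = k
  induction k using Nat.strong_induction_on generalizing d with
  | _ k IH =>
    intro x
    rw [sd]
    by_cases hg : d * d ≤ n
    · have hdn : d ≤ n := pv_le_of_sq_le d n hg
      simp only [dif_pos hg, List.mem_append]
      have hIH := IH (n + 1 - (d + 1)).toNat (by omega) (d + 1) (by omega) rfl x
      constructor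
      · rintro (hx | hx)
        · have hx' : (n % d = 0 ∧ d % 2 = 1) ∧ x = d := by split at hx <;> simp_all
          obtain ⟨⟨h0, h2⟩, rfl⟩ := hx'
          exact ⟨le_refl _, hg, h0, h2⟩
        · obtain ⟨h1, h2, h3, h4⟩ := hIH.mp hx
          exact ⟨by omega, h2, h3, h4⟩
      · rintro ⟨h1, h2, h3, h4⟩
        by_cases hxd : x = d
        · subst hxd
          left
          simp [h3, h4]
        · right
          exact hIH.mpr ⟨by omega, h2, h3, h4⟩
    · simp only [dif_neg hg, List.not_mem_nil, false_iff]
      rintro ⟨h1, h2, _, _⟩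
      nlinarith


theorem ld_mem (n : Int) : ∀ d, 1 ≤ d →
    ∀ x, x ∈ ld n d ↔
      ∃ k, d ≤ k ∧ k * k ≤ n ∧ n % k = 0 ∧ x = n / k ∧ x % 2 = 1 ∧ x ≠ k := by
  intro d hd
  generalize hk : (n + 1 - d).toNat = k0
  induction k0 using Nat.strong_induction_on generalizing d with
  | _ k0 IH =>
    intro x
    rw [ld]
    by_cases hg : d * d ≤ n
    · have hdn : d ≤ n := pv_le_of_sq_le d n hg
      simp only [dif_pos hg, List.mem_append]
      have hIH := IH (n + 1 - (d + 1)).toNat (by omega) (d + 1) (by omega) rfl x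
      constructor
      · rintro (hx | hx)
        · have hx' : (n % d = 0 ∧ (n / d) % 2 = 1 ∧ n / d ≠ d) ∧ x = n / d := by
            split at hx <;> simp_all
          obtain ⟨⟨h0, h2, h3⟩, rfl⟩ := hx'
          exact ⟨d, le_refl _, hg, h0, rfl, h2, h3⟩
        · obtain ⟨k, h1, h2, h3, h4, h5, h6⟩ := hIH.mp hx
          exact ⟨k, by omega, h2, h3, h4, h5, h6⟩
      · rintro ⟨k, h1, h2, h3, h4, h5, h6⟩
        subst h4
        by_cases hkd : k = d
        · subst hkd
          left
          simp [h3, h5, h6]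
        · right
          exact hIH.mpr ⟨k, by omega, h2, h3, rfl, h5, h6⟩
    · simp only [dif_neg hg, List.not_mem_nil, false_iff]
      rintro ⟨k, h1, h2, _⟩
      nlinarith

theorem sd_pairwise (n : Int) : ∀ d, 1 ≤ d → List.Pairwise (· < ·) (sd n d) := by
  intro d hd
  generalize hk : (n + 1 - d).toNat = k
  induction k using Nat.strong_induction_on generalizing d with
  | _ k IH =>
    rw [sd]
    by_cases hg : d * d ≤ n
    · have hdn : d ≤ n := pv_le_of_sq_le d n hg
      simp only [dif_pos hg]
      have hIH := IH (n + 1 - (d + 1)).toNat (by omega) (d + 1) (by omega) rfl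
      split
      · refine List.pairwise_cons.mpr ⟨fun x hx => ?_, hIH⟩
        have := ((sd_mem n (d + 1) (by omega)) x).mp hx
        omega
      · simpa using hIH
    · simp [dif_neg hg]

theorem ld_pairwise (n : Int) : ∀ d, 1 ≤ d → List.Pairwise (· > ·) (ld n d) := by
  intro d hd
  generalize hk : (n + 1 - d).toNat = k
  induction k using Nat.strong_induction_on generalizing d with
  | _ k IH =>
    rw [ld]
    by_cases hg : d * d ≤ n
    · have hdn : d ≤ n := pv_le_of_sq_le d n hg
      simp only [dif_pos hg]
      have hIH := IH (n + 1 - (d + 1)).toNat (by omega) (d + 1) (by omega) rfl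
      split
      · next hc =>
        obtain ⟨h0, hq2, hqd⟩ := hc
        refine List.pairwise_cons.mpr ⟨fun x hx => ?_, hIH⟩
        obtain ⟨k, hk1, hk2, hk3, rfl, _, _⟩ := ((ld_mem n (d + 1) (by omega)) x).mp hx
        have hqdvd : n / d * d = n := Int.ediv_mul_cancel (Int.dvd_of_emod_eq_zero h0)
        have hkdvd : n / k * k = n := Int.ediv_mul_cancel (Int.dvd_of_emod_eq_zero hk3)
        have hq1 : 1 ≤ n / d := by nlinarith
        -- x = n / k with k ≥ d + 1 is strictly below n / d
        by_contra hcon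
        rw [not_lt] at hcon
        nlinarith
      · simpa using hIH
    · simp [dif_neg hg]

-- membership of B's final list equals membership of A's list
theorem B_mem (n : Int) (x : Int) :
    x ∈ sd n 1 ++ (ld n 1).reverse ↔ (1 ≤ x ∧ x ≤ n ∧ x % 2 = 1 ∧ n % x = 0) := by
  simp only [List.mem_append, List.mem_reverse, sd_mem n 1 le_rfl, ld_mem n 1 le_rfl]
  constructor
  · rintro (⟨h1, h2, h3, h4⟩ | ⟨k, hk1, hk2, hk3, rfl, h5, h6⟩)
    · exact ⟨h1, by nlinarith, h4, h3⟩
    · have hkdvd : n / k * k = n := Int.ediv_mul_cancel (Int.dvd_of_emod_eq_zero hk3)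
      have hx1 : 1 ≤ n / k := by nlinarith
      refine ⟨hx1, by nlinarith, h5, Int.emod_eq_zero_of_dvd ⟨k, hkdvd.symm⟩⟩
  · rintro ⟨h1, h2, h3, h4⟩
    have hxdvd : x ∣ n := Int.dvd_of_emod_eq_zero h4
    by_cases hs : x * x ≤ n
    · exact Or.inl ⟨h1, hs, h4, h3⟩
    · right
      have hkx : n / x * x = n := Int.ediv_mul_cancel hxdvd
      have hk1 : 1 ≤ n / x := by nlinarith
      have hkltx : n / x < x := by nlinarith
      refine ⟨n / x, hk1, by nlinarith, Int.emod_eq_zero_of_dvd ⟨x, hkx.symm⟩, ?_, h3, ne_of_gt hkltx⟩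
      have h := Int.mul_ediv_cancel_left x (ne_of_gt (lt_of_lt_of_le zero_lt_one hk1))
      rw [hkx] at h
      exact h.symm

theorem B_pairwise (n : Int) : List.Pairwise (· < ·) (sd n 1 ++ (ld n 1).reverse) := by
  rw [List.pairwise_append]
  refine ⟨sd_pairwise n 1 le_rfl, ?_, ?_⟩
  · rw [List.pairwise_reverse]
    exact ld_pairwise n 1 le_rfl
  · intro a ha b hb
    rw [List.mem_reverse] at hb
    obtain ⟨ha1, ha2, _, _⟩ := (sd_mem n 1 le_rfl a).mp ha
    obtain ⟨k, hk1, hk2, hk3, rfl, _, hbk⟩ := (ld_mem n 1 le_rfl b).mp hb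
    have hkdvd : n / k * k = n := Int.ediv_mul_cancel (Int.dvd_of_emod_eq_zero hk3)
    -- n / k > k since n / k ≠ k and (n / k) * k = n ≥ k * k
    have hle : k ≤ n / k := by nlinarith
    have hgt : k < n / k := lt_of_le_of_ne hle (Ne.symm hbk)
    have hbb : n < n / k * (n / k) := by nlinarith [mul_lt_mul_of_pos_left hgt (show (0:ℤ) < n / k by omega)]
    nlinarith

-- ===== VERDICT (by name: the statement is the Claim_ definition above) =====
theorem mystery_spec : Claim_equal_mystery := by
  intro n _
  unfold Spec_mystery mystery mystery_alt
  rw [altGo_spec n 1 le_rfl [] []]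
  simp only [List.nil_append]
  rw [goA_spec n 1 [], List.nil_append]
  have hperm : (agoA n 1).Perm (sd n 1 ++ (ld n 1).reverse) := by
    refine (List.perm_ext_iff_of_nodup ?_ ?_).mpr ?_
    · exact (A_pairwise n 1).imp (fun h => ne_of_lt h)
    · exact (B_pairwise n).imp (fun h => ne_of_lt h)
    · intro a
      rw [A_mem n 1 le_rfl rfl a, B_mem n a]
  exact hperm.eq_of_pairwise (fun a b _ _ h h' => (lt_asymm h h').elim) (A_pairwise n 1) (B_pairwise n)
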